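-- pv_equiv track=rewrite | github.com/ColinArsenal/itp-w1-create-box | create_box/main.py | empty_box
-- ===== SOURCE A (Python) =====
-- def empty_box(height, width, character):
--     box = ""
--     if height >= 1 and width >= 1:
--         for j in range (height):
--             if j == 0 or j == height - 1:
--                 # Create a full row
--                 for i in range(width):
--                     box += character
--                 box += '\n'
--
--             else:
--                 # Create a row with only the first and last characters:
--                 for i in range(width):
--                     if i == 0 or i == width - 1:
--                         box += character
--                     else:
--                         box += " "
--                 box += '\n'
--
--
--         return box
-- ===== SOURCE B (Python) =====
-- def empty_box(height, width, character):
--     # Compute the two distinct row types once and assemble by repetition.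
--     if height < 1 or width < 1:
--         return None
--     full = character * width + '\n'
--     mid = (character if width == 1 else character + ' ' * (width - 2) + character) + '\n'
--     if height == 1:
--         return full
--     return ''.join([full] + [mid] * (height - 2) + [full])
-- ===== Notes on version B (the rewrite author's own statement) =====
-- stated objective: simpler
-- what changed: Replaces the per-row/per-column character-append loops by computing the full row and the interior row once and assembling the box by repetition (full, mid repeated height-2 times, full).
import Mathlib
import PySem

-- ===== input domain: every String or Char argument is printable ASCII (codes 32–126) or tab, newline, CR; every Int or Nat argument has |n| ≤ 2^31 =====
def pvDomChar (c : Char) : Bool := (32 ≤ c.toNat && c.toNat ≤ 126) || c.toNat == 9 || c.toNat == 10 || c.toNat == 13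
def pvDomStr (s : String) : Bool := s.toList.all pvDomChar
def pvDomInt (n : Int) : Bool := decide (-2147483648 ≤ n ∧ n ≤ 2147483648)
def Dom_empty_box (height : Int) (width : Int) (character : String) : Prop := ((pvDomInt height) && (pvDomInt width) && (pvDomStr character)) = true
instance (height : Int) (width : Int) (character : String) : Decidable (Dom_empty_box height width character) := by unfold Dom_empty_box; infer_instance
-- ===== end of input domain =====

-- B computes the two distinct row types once and assembles the box by repetition
-- instead of looping over every row and column (objective: simpler; A returns None
-- when height < 1 or width < 1 and so does B).

-- ===== PORT A =====
def empty_box (height : Int) (width : Int) (character : String) : Option String :=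
  let box := ""
  if height ≥ 1 ∧ width ≥ 1 then
    some ((PySem.List.pyRange 0 height 1).foldl (fun box j =>
      if j = 0 ∨ j = height - 1 then
        -- full row
        ((PySem.List.pyRange 0 width 1).foldl (fun box _ => box ++ character) box) ++ "\n"
      else
        -- row with only first and last characters
        ((PySem.List.pyRange 0 width 1).foldl (fun box i =>
          if i = 0 ∨ i = width - 1 then box ++ character else box ++ " ") box) ++ "\n") box)
  else
    none  -- Python falls off the function: returns None

-- ===== PORT B =====
-- exact port of Python's `s * n` for n pulled from an int (n ≤ 0 gives "")
def pyStrMul (s : String) : Nat → String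
  | 0 => ""
  | n + 1 => s ++ pyStrMul s n

def empty_box_alt (height : Int) (width : Int) (character : String) : Option String :=
  if height < 1 ∨ width < 1 then none
  else
    let full := pyStrMul character width.toNat ++ "\n"
    let mid := (if width = 1 then character
                else character ++ pyStrMul " " (width - 2).toNat ++ character) ++ "\n"
    if height = 1 then some full
    else some (full ++ pyStrMul mid (height - 2).toNat ++ full)

-- ===== PRECONDITION & SPEC =====
def Spec_empty_box (height : Int) (width : Int) (character : String) (out : Option String) : Prop := out = empty_box_alt height width character
instance (height : Int) (width : Int) (character : String) (out : Option String) : Decidable (Spec_empty_box height width character out) := by unfold Spec_empty_box; infer_instance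

-- ===== CLAIM (what is proved, stated in full; the proofs are below) =====
def Claim_equal_empty_box : Prop := ∀ (height : Int) (width : Int) (character : String), Dom_empty_box height width character → Spec_empty_box height width character (empty_box height width character)

-- ===== LEMMAS AND PROOFS =====

-- a foldl that appends a constant string once per element
theorem foldl_const_append (c : String) :
    ∀ (l : List Int) (b : String),
      l.foldl (fun b (_ : Int) => b ++ c) b = b ++ pyStrMul c l.length := by
  intro l
  induction l with
  | nil => intro b; simp [pyStrMul]
  | cons x xs ih =>
      intro b
      simp only [List.foldl_cons, List.length_cons, ih, pyStrMul]
      rw [String.append_assoc]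

-- the shared "first and last get f, the middle gets g" loop shape
theorem foldl_first_last (f g : String) (N : Int) (hN : 1 ≤ N) (b : String) :
    (PySem.List.pyRange 0 N 1).foldl
        (fun b j => if j = 0 ∨ j = N - 1 then b ++ f else b ++ g) b
      = b ++ (if N = 1 then f else f ++ pyStrMul g (N - 2).toNat ++ f) := by
  rcases eq_or_lt_of_le hN with h1 | h2
  · -- N = 1
    subst h1
    rw [show PySem.List.pyRange 0 1 1 = [0] by simpa using PySem.List.pyRange_one_singleton 0]
    simp
  · -- 2 ≤ N
    have hcons : PySem.List.pyRange 0 N 1 = 0 :: PySem.List.pyRange 1 N 1 :=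
      PySem.List.pyRange_one_cons (by omega)
    have hsplit : PySem.List.pyRange 1 N 1
        = PySem.List.pyRange 1 (N - 1) 1 ++ [N - 1] := by
      have := PySem.List.pyRange_one_succ_right (a := 1) (b := N - 1) (by omega)
      simpa [show N - 1 + 1 = N by omega] using this
    have hmid : ∀ (b' : String),
        (PySem.List.pyRange 1 (N - 1) 1).foldl
            (fun b j => if j = 0 ∨ j = N - 1 then b ++ f else b ++ g) b'
          = b' ++ pyStrMul g (N - 2).toNat := by
      intro b'
      rw [PySem.List.foldl_congr_mem _ _ (fun b (_ : Int) => b ++ g) b'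
        (by
          intro acc x hx
          rcases PySem.List.mem_pyRange_one.mp hx with ⟨hx1, hx2⟩
          have : ¬ (x = 0 ∨ x = N - 1) := by omega
          simp [this])]
      rw [foldl_const_append]
      congr 2
      rw [PySem.List.length_pyRange_one]
      congr 1
      omega
    rw [hcons, hsplit]
    simp only [List.foldl_cons, List.foldl_append, List.foldl_nil,
      true_or, or_true, if_true]
    rw [hmid, if_neg (by omega)]
    simp [String.append_assoc]

theorem empty_box_spec_aux (height width : Int) (character : String)
    (hh : 1 ≤ height) (hw : 1 ≤ width) :
    empty_box height width character = empty_box_alt height width character := by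
  have hfull : ∀ (b : String),
      ((PySem.List.pyRange 0 width 1).foldl (fun b _ => b ++ character) b) ++ "\n"
        = b ++ (pyStrMul character width.toNat ++ "\n") := by
    intro b
    rw [foldl_const_append, PySem.List.length_pyRange_one]
    simp [String.append_assoc, show width - 0 = width by ring]
  have hmid : ∀ (b : String),
      ((PySem.List.pyRange 0 width 1).foldl (fun b i =>
          if i = 0 ∨ i = width - 1 then b ++ character else b ++ " ") b) ++ "\n"
        = b ++ ((if width = 1 then character
                 else character ++ pyStrMul " " (width - 2).toNat ++ character) ++ "\n") := by
    intro b
    rw [foldl_first_last character " " width hw b]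
    simp [String.append_assoc]
  unfold empty_box empty_box_alt
  rw [if_pos ⟨hh, hw⟩, if_neg (by omega)]
  have hbody :
      (fun (box : String) (j : Int) =>
        if j = 0 ∨ j = height - 1 then
          ((PySem.List.pyRange 0 width 1).foldl (fun box _ => box ++ character) box) ++ "\n"
        else
          ((PySem.List.pyRange 0 width 1).foldl (fun box i =>
            if i = 0 ∨ i = width - 1 then box ++ character else box ++ " ") box) ++ "\n")
      = (fun box j =>
          if j = 0 ∨ j = height - 1 then
            box ++ (pyStrMul character width.toNat ++ "\n")
          else
            box ++ ((if width = 1 then character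
                     else character ++ pyStrMul " " (width - 2).toNat ++ character) ++ "\n")) := by
    funext box j
    by_cases hj : j = 0 ∨ j = height - 1
    · simp only [if_pos hj, hfull]
    · simp only [if_neg hj, hmid]
  simp only [hbody]
  rw [foldl_first_last _ _ height hh ""]
  by_cases h1 : height = 1
  · simp [h1]
  · simp [h1]

-- ===== VERDICT (by name: the statement is the Claim_ definition above) =====
theorem empty_box_spec : Claim_equal_empty_box := by
  intro height width character _
  unfold Spec_empty_box
  by_cases h : 1 ≤ height ∧ 1 ≤ width
  · exact empty_box_spec_aux height width character h.1 h.2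
  · unfold empty_box empty_box_alt
    rw [if_neg (by omega), if_pos (by omega)]
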